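-- pv_equiv track=rewrite | github.com/fer0m/CheckIO | checkIO_Esher/1. The_ship_teams.py | two_teams
-- ===== SOURCE A (Python) =====
-- def two_teams(sailors):
--     dict_first = []
--     dict_second = []
--     return_list = []
--
--     for elem in sailors.items():
--         if elem[1] > 40 or elem[1] < 20:
--             dict_first.append(elem[0])
--         else:
--             dict_second.append(elem[0])
--
--     return_list.append(sorted(dict_first))
--     return_list.append(sorted(dict_second))
--
--     return return_list
-- ===== SOURCE B (Python) =====
-- def two_teams(sailors):
--     # Binary-search insertion: each team list is kept sorted at all times; the
--     # slot for every name is found by bisection, so no sort call is ever made.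
--     first, second = [], []
--     for name, age in sailors.items():
--         lst = first if age > 40 or age < 20 else second
--         lo, hi = 0, len(lst)
--         while lo < hi:
--             mid = (lo + hi) // 2
--             if lst[mid] < name:
--                 lo = mid + 1
--             else:
--                 hi = mid
--         lst[lo:lo] = [name]
--     return [first, second]
-- ===== Notes on version B (the rewrite author's own statement) =====
-- stated objective: alternative
-- what changed: B never calls sort: it keeps each team permanently sorted, bisecting (hand-written binary search) to find each name's slot and splicing it in, instead of A's partition-into-two-lists followed by two per-group sort calls.
import Mathlib
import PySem

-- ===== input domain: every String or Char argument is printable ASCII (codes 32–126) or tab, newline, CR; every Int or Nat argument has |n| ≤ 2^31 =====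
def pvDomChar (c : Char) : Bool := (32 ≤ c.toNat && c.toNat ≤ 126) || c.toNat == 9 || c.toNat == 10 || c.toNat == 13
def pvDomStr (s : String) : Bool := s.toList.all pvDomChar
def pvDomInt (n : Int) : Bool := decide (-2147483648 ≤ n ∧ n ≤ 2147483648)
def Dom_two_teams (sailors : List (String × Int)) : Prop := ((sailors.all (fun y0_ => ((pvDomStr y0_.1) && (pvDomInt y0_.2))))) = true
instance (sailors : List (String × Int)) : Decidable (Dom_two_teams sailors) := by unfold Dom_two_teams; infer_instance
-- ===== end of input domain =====

-- B keeps each team permanently sorted, bisecting for every name's slot and splicing it in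
-- (no sort call), replacing A's partition-then-sort-each-group (alternative, not faster).


-- the age test 'elem[1] > 40 or elem[1] < 20' appearing in both programs
def pvFirstTeam (e : String × Int) : Bool := e.2 > 40 || e.2 < 20

-- ===== PORT A =====
-- A's loop body: append the name to dict_first or dict_second
def pvStepA (acc : List String × List String) (elem : String × Int) : List String × List String :=
  if pvFirstTeam elem then (acc.1 ++ [elem.1], acc.2) else (acc.1, acc.2 ++ [elem.1])

-- A: one pass appending each name to dict_first/dict_second, then sort each group
def two_teams (sailors : List (String × Int)) : List (List String) :=
  let st := sailors.foldl pvStepA ([], [])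
  [PySem.List.sorted st.1 (fun x => x) false, PySem.List.sorted st.2 (fun x => x) false]

-- ===== PORT B =====
-- B's while-loop: binary search for the leftmost slot of name in lst[lo:hi]
def pvBisect (lst : List String) (name : String) (lo hi : Nat) : Nat :=
  if _h : lo < hi then
    let mid := (lo + hi) / 2
    if lst.getD mid "" < name then pvBisect lst name (mid + 1) hi
    else pvBisect lst name lo mid
  else lo
  termination_by hi - lo
  decreasing_by all_goals omega

-- B's 'lst[lo:lo] = [name]' splice (exact: B always has 0 ≤ lo ≤ len(lst), where
-- slice-assignment insertion is take lo ++ name :: drop lo); likewise 'lst[mid]'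
-- in the while-loop is getD (exact: B only reads mid with lo ≤ mid < hi ≤ len(lst))
def pvInsertB (lst : List String) (name : String) : List String :=
  let lo := pvBisect lst name 0 lst.length
  List.take lo lst ++ name :: List.drop lo lst

-- B's loop body: bisect-insert the name into the proper team
def pvStepB (acc : List String × List String) (p : String × Int) : List String × List String :=
  if pvFirstTeam p then (pvInsertB acc.1 p.1, acc.2) else (acc.1, pvInsertB acc.2 p.1)

-- B: no sort call; one pass keeping each team sorted by binary-search insertion
def two_teams_alt (sailors : List (String × Int)) : List (List String) :=
  let st := sailors.foldl pvStepB ([], [])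
  [st.1, st.2]

-- ===== PRECONDITION & SPEC =====
def Spec_two_teams (sailors : List (String × Int)) (out : List (List String)) : Prop := out = two_teams_alt sailors
instance (sailors : List (String × Int)) (out : List (List String)) : Decidable (Spec_two_teams sailors out) := by unfold Spec_two_teams; infer_instance

-- ===== CLAIM =====
def Claim_equal_two_teams : Prop := ∀ (sailors : List (String × Int)), Dom_two_teams sailors → Spec_two_teams sailors (two_teams sailors)

-- ===== LEMMAS AND PROOFS =====

-- proof-side helper: ordered insertion (characterises pvInsertB on a sorted list)
def pvInsertSorted (lst : List String) (name : String) : List String :=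
  match lst with
  | [] => [name]
  | h :: t => if name ≤ h then name :: h :: t else h :: pvInsertSorted t name

theorem pvInsertSorted_perm (l : List String) (x : String) :
    (pvInsertSorted l x).Perm (x :: l) := by
  induction l with
  | nil => simp [pvInsertSorted]
  | cons h t ih =>
    simp only [pvInsertSorted]
    split
    · exact List.Perm.refl _
    · exact (ih.cons h).trans (List.Perm.swap x h t)

theorem pvInsertSorted_pairwise (l : List String) (x : String)
    (hl : l.Pairwise (· ≤ ·)) : (pvInsertSorted l x).Pairwise (· ≤ ·) := by
  induction l with
  | nil => simp [pvInsertSorted]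
  | cons h t ih =>
    rcases List.pairwise_cons.mp hl with ⟨hh, ht⟩
    simp only [pvInsertSorted]
    split
    · rename_i hx
      refine List.pairwise_cons.mpr ⟨?_, hl⟩
      intro y hy
      rcases List.mem_cons.mp hy with hy | hy
      · exact hy ▸ hx
      · exact le_trans hx (hh y hy)
    · rename_i hx
      refine List.pairwise_cons.mpr ⟨?_, ih ht⟩
      intro y hy
      rcases List.mem_cons.mp ((pvInsertSorted_perm t x).mem_iff.mp hy) with hy | hy
      · exact hy ▸ le_of_not_ge hx
      · exact hh y hy

-- sortedness as monotonicity of getD on in-range indices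
theorem pvGetD_mono (l : List String) (hl : l.Pairwise (· ≤ ·)) (i j : Nat)
    (hij : i ≤ j) (hj : j < l.length) : l.getD i "" ≤ l.getD j "" := by
  rcases Nat.lt_or_ge i j with h | h
  · rw [List.getD_eq_getElem l "" (lt_trans h hj), List.getD_eq_getElem l "" hj]
    exact List.pairwise_iff_getElem.mp hl i j (lt_trans h hj) hj h
  · have : i = j := le_antisymm hij h
    subst this
    exact le_refl _

-- binary-search invariant: the result keeps everything below it < name and everything from it on ≥ name
theorem pvBisect_spec (lst : List String) (name : String) (lo hi : Nat)
    (hsort : lst.Pairwise (· ≤ ·)) (hhi : hi ≤ lst.length) (hlo : lo ≤ hi)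
    (hbelow : ∀ j, j < lo → lst.getD j "" < name)
    (habove : ∀ j, hi ≤ j → j < lst.length → name ≤ lst.getD j "") :
    pvBisect lst name lo hi ≤ lst.length ∧
    (∀ j, j < pvBisect lst name lo hi → lst.getD j "" < name) ∧
    (∀ j, pvBisect lst name lo hi ≤ j → j < lst.length → name ≤ lst.getD j "") := by
  induction lo, hi using pvBisect.induct lst name with
  | case1 lo hi h mid hcmp ih =>
    rw [pvBisect, dif_pos h,
      if_pos (show lst.getD ((lo + hi) / 2) "" < name from hcmp)]
    refine ih ?_ ?_ ?_ ?_
    · exact hhi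
    · omega
    · intro j hj
      rcases Nat.lt_or_ge j lo with hcase | hcase
      · exact hbelow j hcase
      · exact lt_of_le_of_lt (pvGetD_mono lst hsort j mid (by omega) (by omega)) hcmp
    · exact habove
  | case2 lo hi h mid hcmp ih =>
    rw [pvBisect, dif_pos h,
      if_neg (show ¬ lst.getD ((lo + hi) / 2) "" < name from hcmp)]
    refine ih ?_ ?_ ?_ ?_
    · omega
    · omega
    · exact hbelow
    · intro j hj hjl
      exact le_trans (not_lt.mp hcmp) (pvGetD_mono lst hsort mid j hj hjl)
  | case3 lo hi h =>
    rw [pvBisect, dif_neg h]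
    have : lo = hi := by omega
    exact ⟨by omega, hbelow, fun j hj hjl => habove j (this ▸ hj) hjl⟩

-- splicing at any position with the bisect property is exactly ordered insertion
theorem pvSplice_eq_insertSorted (l : List String) (name : String) (p : Nat)
    (hp : p ≤ l.length)
    (hb : ∀ j, j < p → l.getD j "" < name)
    (ha : ∀ j, p ≤ j → j < l.length → name ≤ l.getD j "") :
    List.take p l ++ name :: List.drop p l = pvInsertSorted l name := by
  induction l generalizing p with
  | nil =>
    have : p = 0 := by simpa using hp
    subst this
    simp [pvInsertSorted]
  | cons h t ih =>
    cases p with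
    | zero =>
      have hle : name ≤ h := ha 0 (Nat.zero_le _) (by simp)
      simp [pvInsertSorted, hle]
    | succ k =>
      have hlt : h < name := hb 0 (Nat.succ_pos _)
      have hnle : ¬ name ≤ h := not_le.mpr hlt
      simp only [pvInsertSorted, if_neg hnle, List.take_succ_cons, List.drop_succ_cons,
        List.cons_append]
      congr 1
      exact ih k (by simpa using hp) (fun j hj => hb (j + 1) (by omega))
        (fun j hj hjl => ha (j + 1) (by omega) (by simpa using hjl))

-- on a sorted list, B's bisect-splice is ordered insertion
theorem pvInsertB_eq (l : List String) (name : String) (hl : l.Pairwise (· ≤ ·)) :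
    pvInsertB l name = pvInsertSorted l name := by
  obtain ⟨h1, h2, h3⟩ := pvBisect_spec l name 0 l.length hl (le_refl _) (Nat.zero_le _)
    (fun j hj => absurd hj (Nat.not_lt_zero _)) (fun j hj hjl => absurd hjl (by omega))
  exact pvSplice_eq_insertSorted l name _ h1 h2 h3

-- A's appending fold computes (filter, filter-not) of the names
theorem pvFoldA (l : List (String × Int)) (a b : List String) :
    l.foldl pvStepA (a, b)
    = (a ++ (l.filter pvFirstTeam).map Prod.fst,
       b ++ (l.filter (fun e => !pvFirstTeam e)).map Prod.fst) := by
  induction l generalizing a b with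
  | nil => simp
  | cons h t ih =>
    by_cases hp : pvFirstTeam h <;> simp [pvStepA, hp, ih]

-- B's fold: both teams stay sorted and are permutations of the filtered names
theorem pvFoldB (l : List (String × Int)) (a b : List String)
    (ha : a.Pairwise (· ≤ ·)) (hb : b.Pairwise (· ≤ ·)) :
    (l.foldl pvStepB (a, b)).1.Pairwise (· ≤ ·) ∧
    (l.foldl pvStepB (a, b)).2.Pairwise (· ≤ ·) ∧
    (l.foldl pvStepB (a, b)).1.Perm (a ++ (l.filter pvFirstTeam).map Prod.fst) ∧
    (l.foldl pvStepB (a, b)).2.Perm (b ++ (l.filter (fun e => !pvFirstTeam e)).map Prod.fst) := by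
  induction l generalizing a b with
  | nil =>
    simp only [List.foldl_nil, List.filter_nil, List.map_nil, List.append_nil]
    exact ⟨ha, hb, List.Perm.refl _, List.Perm.refl _⟩
  | cons h t ih =>
    by_cases hp : pvFirstTeam h = true
    · have step : pvStepB (a, b) h = (pvInsertSorted a h.1, b) := by
        simp [pvStepB, hp, pvInsertB_eq a h.1 ha]
      have := ih (pvInsertSorted a h.1) b (pvInsertSorted_pairwise a h.1 ha) hb
      have hf1 : List.filter pvFirstTeam (h :: t) = h :: List.filter pvFirstTeam t := by
        simp [hp]
      have hf2 : List.filter (fun e => !pvFirstTeam e) (h :: t)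
          = List.filter (fun e => !pvFirstTeam e) t := by simp [hp]
      simp only [List.foldl_cons, step, hf1, hf2, List.map_cons]
      exact ⟨this.1, this.2.1,
        this.2.2.1.trans (((pvInsertSorted_perm a h.1).append_right _).trans
          List.perm_middle.symm),
        this.2.2.2⟩
    · have hp' : pvFirstTeam h = false := by simpa using hp
      have step : pvStepB (a, b) h = (a, pvInsertSorted b h.1) := by
        simp [pvStepB, hp', pvInsertB_eq b h.1 hb]
      have := ih a (pvInsertSorted b h.1) ha (pvInsertSorted_pairwise b h.1 hb)
      have hf1 : List.filter pvFirstTeam (h :: t) = List.filter pvFirstTeam t := by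
        simp [hp']
      have hf2 : List.filter (fun e => !pvFirstTeam e) (h :: t)
          = h :: List.filter (fun e => !pvFirstTeam e) t := by simp [hp']
      simp only [List.foldl_cons, step, hf1, hf2, List.map_cons]
      exact ⟨this.1, this.2.1, this.2.2.1,
        this.2.2.2.trans (((pvInsertSorted_perm b h.1).append_right _).trans
          List.perm_middle.symm)⟩

-- ===== VERDICT =====
theorem two_teams_spec : Claim_equal_two_teams := by
  intro sailors _
  unfold Spec_two_teams two_teams two_teams_alt
  obtain ⟨h1p, h2p, h1perm, h2perm⟩ := pvFoldB sailors [] [] (by simp) (by simp)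
  simp only [List.nil_append] at h1perm h2perm
  have e1 := PySem.List.sorted_id_eq_of_perm_of_pairwise _ _ h1perm h1p
  have e2 := PySem.List.sorted_id_eq_of_perm_of_pairwise _ _ h2perm h2p
  simp only [pvFoldA, List.nil_append]
  rw [e1, e2]
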